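-- pv_equiv track=rewrite | github.com/LJmartin94/AdventOfCode_2021 | day5/ex00.py | draw_horizontal_lines
-- ===== SOURCE A (Python) =====
-- def draw_horizontal_lines(grid, op_array):
--     for op in op_array:
--         xa = int(op[0][0])
--         xb = int(op[1][0])
--         ya = int(op[0][1])
--         yb = int(op[1][1])
--         if xa == xb:
--             if ya > yb:
--                 swap = ya
--                 ya = yb
--                 yb = swap
--             for i in range(yb - ya + 1):
--                 grid[xa][ya + i] += 1
--     return grid
-- ===== SOURCE B (Python) =====
-- def draw_horizontal_lines(grid, op_array):
--     # Difference array per row, then one prefix-sum pass over the grid.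
--     diffs = [None] * len(grid)
--     for op in op_array:
--         xa = int(op[0][0])
--         xb = int(op[1][0])
--         ya = int(op[0][1])
--         yb = int(op[1][1])
--         if xa == xb:
--             lo, hi = (ya, yb) if ya <= yb else (yb, ya)
--             d = diffs[xa]
--             if d is None:
--                 d = [0] * (len(grid[xa]) + 1)
--                 diffs[xa] = d
--             d[lo] += 1
--             d[hi + 1] -= 1
--     for x, d in enumerate(diffs):
--         if d is not None:
--             row = grid[x]
--             acc = 0
--             for j in range(len(row)):
--                 acc += d[j]
--                 row[j] += acc
--     return grid
-- ===== Notes on version B (the rewrite author's own statement) =====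
-- stated objective: alternative
-- what changed: A walks every vertical segment cell by cell (one grid write per covered cell per op); B instead accumulates a per-row difference array (two writes per op) and then adds one prefix-sum pass over the whole grid.
-- outside the precondition, e.g. on draw_horizontal_lines([[0, 0]], [[[0, -1], [0, -1]]]): A returns [[0, 1]], B returns [[-1, -1]]
import Mathlib
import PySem

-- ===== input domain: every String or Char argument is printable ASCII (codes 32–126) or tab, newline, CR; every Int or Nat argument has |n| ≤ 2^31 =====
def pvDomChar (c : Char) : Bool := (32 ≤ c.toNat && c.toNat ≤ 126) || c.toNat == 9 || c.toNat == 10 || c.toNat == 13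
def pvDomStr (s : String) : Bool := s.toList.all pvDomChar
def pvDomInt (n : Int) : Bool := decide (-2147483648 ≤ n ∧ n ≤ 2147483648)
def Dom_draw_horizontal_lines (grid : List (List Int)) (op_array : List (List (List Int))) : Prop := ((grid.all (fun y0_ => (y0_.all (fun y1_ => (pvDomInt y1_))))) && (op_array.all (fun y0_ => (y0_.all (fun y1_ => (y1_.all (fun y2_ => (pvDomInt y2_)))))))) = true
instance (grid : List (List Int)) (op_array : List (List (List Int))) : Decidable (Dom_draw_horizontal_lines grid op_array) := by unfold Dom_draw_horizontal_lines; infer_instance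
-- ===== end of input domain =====

-- B replaces A's per-cell walk along every vertical segment by a different algorithm: a
-- difference array per row plus one prefix-sum pass (objective: alternative). Both A and B
-- mutate `grid` in place in Python and return it; the equivalence proved here is about the
-- returned value.

-- ===== PORT A =====
-- literal transliteration of A: for each op, if x-coordinates agree, swap the y's into
-- order and bump every cell grid[xa][ya+i] one by one.
def draw_horizontal_lines (grid : List (List Int)) (op_array : List (List (List Int))) : List (List Int) :=
  op_array.foldl (fun g op =>
    let xa := PySem.List.pyGetD (PySem.List.pyGetD op 0 []) 0 0
    let xb := PySem.List.pyGetD (PySem.List.pyGetD op 1 []) 0 0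
    let ya := PySem.List.pyGetD (PySem.List.pyGetD op 0 []) 1 0
    let yb := PySem.List.pyGetD (PySem.List.pyGetD op 1 []) 1 0
    if xa = xb then
      let ya' := if ya > yb then yb else ya
      let yb' := if ya > yb then ya else yb
      (PySem.List.pyRange 0 (yb' - ya' + 1) 1).foldl (fun g i =>
        let row := PySem.List.pyGetD g xa []
        PySem.List.pySetD g xa
          (PySem.List.pySetD row (ya' + i) (PySem.List.pyGetD row (ya' + i) 0 + 1))) g
    else g) grid

-- ===== PORT B =====
-- literal transliteration of B (Source B): phase 1 folds the ops into one difference array per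
-- touched row (diffs[x] = None when untouched); phase 2 walks enumerate(diffs) and adds the
-- running prefix sum of each difference array to its row.
def draw_horizontal_lines_alt (grid : List (List Int)) (op_array : List (List (List Int))) : List (List Int) :=
  let diffs := op_array.foldl (fun ds op =>
    let xa := PySem.List.pyGetD (PySem.List.pyGetD op 0 []) 0 0
    let xb := PySem.List.pyGetD (PySem.List.pyGetD op 1 []) 0 0
    let ya := PySem.List.pyGetD (PySem.List.pyGetD op 0 []) 1 0
    let yb := PySem.List.pyGetD (PySem.List.pyGetD op 1 []) 1 0
    if xa = xb then
      let lo := if ya ≤ yb then ya else yb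
      let hi := if ya ≤ yb then yb else ya
      let d0 := match PySem.List.pyGetD ds xa none with
        | none => List.replicate ((PySem.List.pyGetD grid xa []).length + 1) (0 : Int)
        | some d => d
      let d1 := PySem.List.pySetD d0 lo (PySem.List.pyGetD d0 lo 0 + 1)
      let d2 := PySem.List.pySetD d1 (hi + 1) (PySem.List.pyGetD d1 (hi + 1) 0 - 1)
      PySem.List.pySetD ds xa (some d2)
    else ds) (List.replicate grid.length (none : Option (List Int)))
  (PySem.List.enumerate diffs 0).foldl (fun g xd =>
    match xd.2 with
    | none => g
    | some d =>
      let row := PySem.List.pyGetD g xd.1 []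
      PySem.List.pySetD g xd.1
        ((PySem.List.pyRange 0 (row.length : Int) 1).foldl
          (fun st j =>
            let acc := st.2 + PySem.List.pyGetD d j 0
            (PySem.List.pySetD st.1 j (PySem.List.pyGetD st.1 j 0 + acc), acc))
          (row, (0 : Int))).1) grid

-- ===== PRECONDITION & SPEC =====
-- Python index normalization (negative indices count from the end); used by Pre_ only to
-- name the row an op addresses.
def pvNidx (n : Nat) (x : Int) : Nat := (if x < 0 then x + (n : Int) else x).toNat

-- Pre_ requires every op to have two endpoints with two coordinates each and every vertical
-- op to address an existing row with its y-range inside the row (else A raises IndexError).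
-- Pre_ also excludes vertical ops with a negative y endpoint that is still in Python's index
-- range: A returns there, but the cells it bumps come from Python's accidental
-- negative-index wraparound while B's difference array reads the segment positionally and
-- returns other values; negative coordinates are outside this drawing code's natural domain.
def Pre_draw_horizontal_lines (grid : List (List Int)) (op_array : List (List (List Int))) : Prop :=
  ∀ op ∈ op_array,
    2 ≤ op.length ∧ 2 ≤ (op.getD 0 []).length ∧ 2 ≤ (op.getD 1 []).length ∧
    ((op.getD 0 []).getD 0 0 = (op.getD 1 []).getD 0 0 →
      -(grid.length : Int) ≤ (op.getD 0 []).getD 0 0 ∧ (op.getD 0 []).getD 0 0 < grid.length ∧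
      0 ≤ min ((op.getD 0 []).getD 1 0) ((op.getD 1 []).getD 1 0) ∧
      max ((op.getD 0 []).getD 1 0) ((op.getD 1 []).getD 1 0) <
          ((grid.getD (pvNidx grid.length ((op.getD 0 []).getD 0 0)) []).length : Int))
instance (grid : List (List Int)) (op_array : List (List (List Int))) : Decidable (Pre_draw_horizontal_lines grid op_array) := by
  unfold Pre_draw_horizontal_lines; infer_instance

def pvWitness_draw_horizontal_lines : List (List Int) × List (List (List Int)) :=
  ([[0, 0], [0, 0]], [[[1, 0], [1, 1]]])

def Spec_draw_horizontal_lines (grid : List (List Int)) (op_array : List (List (List Int))) (out : List (List Int)) : Prop :=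
  out = draw_horizontal_lines_alt grid op_array
instance (grid : List (List Int)) (op_array : List (List (List Int))) (out : List (List Int)) : Decidable (Spec_draw_horizontal_lines grid op_array out) := by
  unfold Spec_draw_horizontal_lines; infer_instance

-- ===== CLAIM (what is proved, stated in full; the proofs are below) =====
def Claim_equal_draw_horizontal_lines : Prop := ∀ (grid : List (List Int)) (op_array : List (List (List Int))), Dom_draw_horizontal_lines grid op_array → Pre_draw_horizontal_lines grid op_array → Spec_draw_horizontal_lines grid op_array (draw_horizontal_lines grid op_array)

-- ===== LEMMAS AND PROOFS =====

theorem pvIdx_nidx (n : Nat) (x : Int) (h1 : -(n : Int) ≤ x) (h2 : x < n) :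
    PySem.List.pyIdx? n x = some (pvNidx n x) := by
  unfold PySem.List.pyIdx? pvNidx; split_ifs <;> simp_all <;> omega
theorem pvNidx_lt (n : Nat) (x : Int) (h1 : -(n : Int) ≤ x) (h2 : x < n) : pvNidx n x < n := by
  unfold pvNidx; split_ifs <;> omega
theorem pvGetD_nidx {α : Type} (xs : List α) (x : Int) (d : α)
    (h1 : -(xs.length : Int) ≤ x) (h2 : x < xs.length) :
    PySem.List.pyGetD xs x d = xs.getD (pvNidx xs.length x) d := by
  unfold PySem.List.pyGetD PySem.List.pyGet?
  rw [pvIdx_nidx _ _ h1 h2]; simp [List.getD_eq_getElem?_getD]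
theorem pvSetD_nidx {α : Type} (xs : List α) (x : Int) (v : α)
    (h1 : -(xs.length : Int) ≤ x) (h2 : x < xs.length) :
    PySem.List.pySetD xs x v = xs.set (pvNidx xs.length x) v := by
  unfold PySem.List.pySetD PySem.List.pySet?
  rw [pvIdx_nidx _ _ h1 h2]; rfl
theorem pvGetD_set {α : Type} (l : List α) (i : Nat) (v : α) (r : Nat) (d : α) :
    (l.set i v).getD r d = if r = i ∧ i < l.length then v else l.getD r d := by
  simp [List.getD_eq_getElem?_getD, List.getElem?_set]
  split_ifs with h1 h2 h3 h4 <;> simp_all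
def pvShape (g : List (List Int)) : List Nat := g.map List.length
def pvCell (g : List (List Int)) (r j : Nat) : Int := (g.getD r []).getD j 0
theorem pvShape_length {grid g : List (List Int)} (h : pvShape g = pvShape grid) :
    g.length = grid.length := by
  have := congrArg List.length h; simpa [pvShape] using this
theorem pvShape_row {grid g : List (List Int)} (h : pvShape g = pvShape grid) (r : Nat) :
    (g.getD r []).length = (grid.getD r []).length := by
  have hlen := pvShape_length h
  by_cases hr : r < grid.length
  · have := congrArg (fun l => l.getD r 0) h
    simpa [pvShape, List.getD_eq_getElem?_getD, List.getElem?_map,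
      List.getElem?_eq_getElem, hr, hlen.symm ▸ hr] using this
  · rw [List.getD_eq_default _ _ (by omega), List.getD_eq_default _ _ (by omega)]

theorem pvShape_set {grid g : List (List Int)} (h : pvShape g = pvShape grid)
    (r : Nat) (row : List Int) (hrow : row.length = (g.getD r []).length) :
    pvShape (g.set r row) = pvShape grid := by
  rw [← h]
  unfold pvShape
  rw [List.map_set]
  apply List.ext_getElem?
  intro i
  rw [List.getElem?_set]
  by_cases hir : r = i
  · subst hir
    by_cases hr : r < (g.map List.length).length
    · have hr' : r < g.length := by simpa using hr
      simp [hr, hrow, List.getElem?_eq_getElem, hr', List.getD_eq_getElem?_getD,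
        List.getElem?_eq_getElem]
    · have hr' : ¬ r < g.length := by simpa using hr
      simp [hr, hr']
  · simp [hir]

theorem pvNidx_toNat (n : Nat) (x : Int) (h : 0 ≤ x) : pvNidx n x = x.toNat := by
  unfold pvNidx; split_ifs <;> omega

theorem pvSeg (grid : List (List Int)) (xa lo : Int)
    (hx1 : -(grid.length : Int) ≤ xa) (hx2 : xa < grid.length) (hlo : 0 ≤ lo) :
    ∀ (k : Nat) (g : List (List Int)), pvShape g = pvShape grid →
      lo + k ≤ ((grid.getD (pvNidx grid.length xa) []).length : Int) →
      pvShape ((PySem.List.pyRange 0 (k : Int) 1).foldl (fun g i =>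
          let row := PySem.List.pyGetD g xa []
          PySem.List.pySetD g xa
            (PySem.List.pySetD row (lo + i) (PySem.List.pyGetD row (lo + i) 0 + 1))) g) = pvShape grid ∧
      ∀ r j : Nat,
        pvCell ((PySem.List.pyRange 0 (k : Int) 1).foldl (fun g i =>
          let row := PySem.List.pyGetD g xa []
          PySem.List.pySetD g xa
            (PySem.List.pySetD row (lo + i) (PySem.List.pyGetD row (lo + i) 0 + 1))) g) r j =
        pvCell g r j + (if pvNidx grid.length xa = r ∧ lo ≤ (j : Int) ∧ (j : Int) < lo + k then 1 else 0) := by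
  intro k
  induction k with
  | zero =>
    intro g hsh _
    rw [PySem.List.pyRange_one_eq_nil (by omega)]
    simp only [List.foldl_nil]
    refine ⟨hsh, ?_⟩
    intro r j
    have : ¬ (pvNidx grid.length xa = r ∧ lo ≤ (j : Int) ∧ (j : Int) < lo + (0:Nat)) := by
      push_cast; omega
    rw [if_neg this]; ring
  | succ k ih =>
    intro g hsh hbound
    have hk : ((k+1 : Nat) : Int) = (k : Int) + 1 := by push_cast; ring
    rw [hk, PySem.List.pyRange_one_succ_right (by omega), List.foldl_append]
    have hbk : lo + (k : Int) ≤ ((grid.getD (pvNidx grid.length xa) []).length : Int) := by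
      push_cast at hbound ⊢; omega
    obtain ⟨ihs, ihc⟩ := ih g hsh hbk
    set gk := (PySem.List.pyRange 0 (k : Int) 1).foldl (fun g i =>
          let row := PySem.List.pyGetD g xa []
          PySem.List.pySetD g xa
            (PySem.List.pySetD row (lo + i) (PySem.List.pyGetD row (lo + i) 0 + 1))) g with hgk
    simp only [List.foldl_cons, List.foldl_nil]
    have hglen : gk.length = grid.length := pvShape_length ihs
    have hx1' : -(gk.length : Int) ≤ xa := by rw [hglen]; exact hx1
    have hx2' : xa < (gk.length : Int) := by rw [hglen]; exact hx2
    set r0 := pvNidx grid.length xa with hr0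
    have hr0g : pvNidx gk.length xa = r0 := by rw [hglen]
    have hrow : PySem.List.pyGetD gk xa [] = gk.getD r0 [] := by
      rw [pvGetD_nidx _ _ _ hx1' hx2', hr0g]
    have hrlen : (gk.getD r0 []).length = (grid.getD r0 []).length := pvShape_row ihs r0
    have hcbound : lo + (k:Int) < ((gk.getD r0 []).length : Int) := by
      rw [hrlen]; push_cast at hbound ⊢; omega
    have hinner : PySem.List.pySetD (PySem.List.pyGetD gk xa [])
        (lo + (k:Int)) (PySem.List.pyGetD (PySem.List.pyGetD gk xa []) (lo + (k:Int)) 0 + 1) =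
        (gk.getD r0 []).set ((lo + (k:Int)).toNat) ((gk.getD r0 []).getD ((lo + (k:Int)).toNat) 0 + 1) := by
      rw [hrow, pvSetD_nidx _ _ _ (by omega) hcbound, pvGetD_nidx _ _ _ (by omega) hcbound,
        pvNidx_toNat _ _ (by omega)]
    have hr0lt : r0 < gk.length := by rw [hglen]; exact pvNidx_lt _ _ hx1 hx2
    have houter : ∀ v, PySem.List.pySetD gk xa v = gk.set r0 v := by
      intro v; rw [pvSetD_nidx _ _ _ hx1' hx2', hr0g]
    simp only [hinner, houter]
    constructor
    · exact pvShape_set ihs r0 _ (by simp)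
    · intro r j
      unfold pvCell
      rw [pvGetD_set]
      have hik := ihc r j
      unfold pvCell at hik
      by_cases hr : r = r0
      · subst hr
        rw [if_pos ⟨rfl, hr0lt⟩, pvGetD_set]
        by_cases hj : j = (lo + (k : Int)).toNat
        · rw [if_pos ⟨hj, by omega⟩, ← hj]
          split_ifs at hik ⊢ <;> omega
        · rw [if_neg (fun hc => hj hc.1)]
          split_ifs at hik ⊢ <;> omega
      · rw [if_neg (fun hc => hr hc.1)]
        split_ifs at hik ⊢ <;> omega

theorem pvStepA (grid : List (List Int)) (xa xb ya yb : Int) (g : List (List Int))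
    (hsh : pvShape g = pvShape grid)
    (hgood : xa = xb →
      -(grid.length : Int) ≤ xa ∧ xa < grid.length ∧ 0 ≤ min ya yb ∧
      max ya yb < ((grid.getD (pvNidx grid.length xa) []).length : Int)) :
    pvShape (if xa = xb then
        (PySem.List.pyRange 0 ((if ya > yb then ya else yb) - (if ya > yb then yb else ya) + 1) 1).foldl
          (fun g i =>
            let row := PySem.List.pyGetD g xa []
            PySem.List.pySetD g xa
              (PySem.List.pySetD row ((if ya > yb then yb else ya) + i)
                (PySem.List.pyGetD row ((if ya > yb then yb else ya) + i) 0 + 1))) g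
      else g) = pvShape grid ∧
    ∀ r j : Nat,
      pvCell (if xa = xb then
        (PySem.List.pyRange 0 ((if ya > yb then ya else yb) - (if ya > yb then yb else ya) + 1) 1).foldl
          (fun g i =>
            let row := PySem.List.pyGetD g xa []
            PySem.List.pySetD g xa
              (PySem.List.pySetD row ((if ya > yb then yb else ya) + i)
                (PySem.List.pyGetD row ((if ya > yb then yb else ya) + i) 0 + 1))) g
      else g) r j =
      pvCell g r j +
        (if xa = xb ∧ pvNidx grid.length xa = r ∧ min ya yb ≤ (j : Int) ∧ (j : Int) ≤ max ya yb then 1 else 0) := by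
  by_cases hv : xa = xb
  · simp only [if_pos hv]
    obtain ⟨h1, h2, h3, h4⟩ := hgood hv
    set lo := if ya > yb then yb else ya with hlo
    set hi := if ya > yb then ya else yb with hhi
    have hlomin : lo = min ya yb := by rw [hlo]; split_ifs <;> omega
    have hhimax : hi = max ya yb := by rw [hhi]; split_ifs <;> omega
    have hm : hi - lo + 1 = (((hi - lo + 1).toNat : Nat) : Int) := by omega
    rw [hm]
    obtain ⟨hs, hc⟩ := pvSeg grid xa lo h1 h2 (by omega) ((hi - lo + 1).toNat) g hsh (by push_cast; omega)
    refine ⟨hs, ?_⟩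
    intro r j
    rw [hc r j]
    congr 1
    rw [hlomin, hhimax] at *
    split_ifs <;> first | rfl | omega
  · simp only [if_neg hv]
    refine ⟨hsh, ?_⟩
    intro r j
    rw [if_neg (fun hc => hv hc.1)]
    ring

def pvA0 (op : List (List Int)) : Int := (op.getD 0 []).getD 0 0
def pvB0 (op : List (List Int)) : Int := (op.getD 1 []).getD 0 0
def pvA1 (op : List (List Int)) : Int := (op.getD 0 []).getD 1 0
def pvB1 (op : List (List Int)) : Int := (op.getD 1 []).getD 1 0
def pvLo (op : List (List Int)) : Int := min (pvA1 op) (pvB1 op)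
def pvHi (op : List (List Int)) : Int := max (pvA1 op) (pvB1 op)
def pvGood (grid : List (List Int)) (op : List (List Int)) : Prop :=
  pvA0 op = pvB0 op →
    -(grid.length : Int) ≤ pvA0 op ∧ pvA0 op < grid.length ∧ 0 ≤ pvLo op ∧
    pvHi op < ((grid.getD (pvNidx grid.length (pvA0 op)) []).length : Int)
def pvCnt (grid : List (List Int)) (op : List (List Int)) (r j : Nat) : Int :=
  if pvA0 op = pvB0 op ∧ pvNidx grid.length (pvA0 op) = r ∧ pvLo op ≤ (j : Int) ∧ (j : Int) ≤ pvHi op then 1 else 0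
def pvS (grid : List (List Int)) (ops : List (List (List Int))) (r j : Nat) : Int :=
  (ops.map (fun op => pvCnt grid op r j)).sum

theorem pvGetD_one {α : Type} (xs : List α) (d : α) : PySem.List.pyGetD xs 1 d = xs.getD 1 d := by
  have h : (1 : Int) = ((1 : Nat) : Int) := by norm_num
  rw [h, PySem.List.pyGetD_natCast]

theorem pvGetD_zero' {α : Type} (xs : List α) (d : α) : PySem.List.pyGetD xs 0 d = xs.getD 0 d := by
  have h : (0 : Int) = ((0 : Nat) : Int) := by norm_num
  rw [h, PySem.List.pyGetD_natCast]

def pvBodyA : List (List Int) → List (List Int) → List (List Int) := fun g op =>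
  let xa := PySem.List.pyGetD (PySem.List.pyGetD op 0 []) 0 0
  let xb := PySem.List.pyGetD (PySem.List.pyGetD op 1 []) 0 0
  let ya := PySem.List.pyGetD (PySem.List.pyGetD op 0 []) 1 0
  let yb := PySem.List.pyGetD (PySem.List.pyGetD op 1 []) 1 0
  if xa = xb then
    let ya' := if ya > yb then yb else ya
    let yb' := if ya > yb then ya else yb
    (PySem.List.pyRange 0 (yb' - ya' + 1) 1).foldl (fun g i =>
      let row := PySem.List.pyGetD g xa []
      PySem.List.pySetD g xa
        (PySem.List.pySetD row (ya' + i) (PySem.List.pyGetD row (ya' + i) 0 + 1))) g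
  else g

theorem pvStepA' (grid op g : List (List Int)) (hsh : pvShape g = pvShape grid)
    (hgood : pvGood grid op) :
    pvShape (pvBodyA g op) = pvShape grid ∧
    ∀ r j : Nat, pvCell (pvBodyA g op) r j = pvCell g r j + pvCnt grid op r j := by
  have h0 : PySem.List.pyGetD (PySem.List.pyGetD op 0 []) 0 0 = pvA0 op := by
    rw [pvGetD_zero', pvGetD_zero']; rfl
  have h1 : PySem.List.pyGetD (PySem.List.pyGetD op 1 []) 0 0 = pvB0 op := by
    rw [pvGetD_one, pvGetD_zero']; rfl
  have h2 : PySem.List.pyGetD (PySem.List.pyGetD op 0 []) 1 0 = pvA1 op := by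
    rw [pvGetD_zero', pvGetD_one]; rfl
  have h3 : PySem.List.pyGetD (PySem.List.pyGetD op 1 []) 1 0 = pvB1 op := by
    rw [pvGetD_one, pvGetD_one]; rfl
  obtain ⟨s1, c1⟩ := pvStepA grid (PySem.List.pyGetD (PySem.List.pyGetD op 0 []) 0 0)
    (PySem.List.pyGetD (PySem.List.pyGetD op 1 []) 0 0)
    (PySem.List.pyGetD (PySem.List.pyGetD op 0 []) 1 0)
    (PySem.List.pyGetD (PySem.List.pyGetD op 1 []) 1 0) g hsh
    (by rw [h0, h1, h2, h3]; exact fun hv => hgood hv)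
  refine ⟨s1, ?_⟩
  intro r j
  have c1' := c1 r j
  unfold pvBodyA
  dsimp only
  rw [c1' ]
  unfold pvCnt pvLo pvHi
  rw [h0, h1, h2, h3]

theorem pvA_main (grid : List (List Int)) :
    ∀ (ops : List (List (List Int))) (g : List (List Int)),
      (∀ op ∈ ops, pvGood grid op) → pvShape g = pvShape grid →
      pvShape (ops.foldl pvBodyA g) = pvShape grid ∧
      ∀ r j : Nat, pvCell (ops.foldl pvBodyA g) r j = pvCell g r j + pvS grid ops r j := by
  intro ops
  induction ops with
  | nil =>
    intro g _ hsh
    simp only [List.foldl_nil]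
    exact ⟨hsh, fun r j => by simp [pvS]⟩
  | cons op ops ih =>
    intro g hgood hsh
    simp only [List.foldl_cons]
    obtain ⟨s1, c1⟩ := pvStepA' grid op g hsh (hgood op (by simp))
    obtain ⟨s2, c2⟩ := ih (pvBodyA g op) (fun o ho => hgood o (by simp [ho])) s1
    refine ⟨s2, ?_⟩
    intro r j
    rw [c2 r j, c1 r j]
    simp [pvS]
    ring

def pvPsum (d : List Int) (k : Nat) : Int := ((List.range k).map (fun i => d.getD i 0)).sum
theorem pvPsum_succ (d : List Int) (k : Nat) : pvPsum d (k + 1) = pvPsum d k + d.getD k 0 := by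
  simp [pvPsum, List.range_succ]
theorem pvPsum_set (d : List Int) (p : Nat) (c : Int) (k : Nat) (hp : p < d.length) :
    pvPsum (d.set p (d.getD p 0 + c)) k = pvPsum d k + if p < k then c else 0 := by
  induction k with
  | zero => simp [pvPsum]
  | succ k ih =>
    rw [pvPsum_succ, pvPsum_succ, ih, pvGetD_set]
    split_ifs <;> simp_all <;> omega
theorem pvPsum_replicate (m k : Nat) : pvPsum (List.replicate m (0 : Int)) k = 0 := by
  induction k with
  | zero => simp [pvPsum]
  | succ k ih =>
    rw [pvPsum_succ, ih]
    simp [List.getD_eq_getElem?_getD, List.getElem?_replicate]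
    split_ifs <;> simp

-- inner prefix-sum pass of B, generalized over the number of processed cells
theorem pvRowAux (d row : List Int) :
    ∀ k : Nat, k ≤ row.length →
      (((PySem.List.pyRange 0 (k : Int) 1).foldl
          (fun st j =>
            let acc := st.2 + PySem.List.pyGetD d j 0
            (PySem.List.pySetD st.1 j (PySem.List.pyGetD st.1 j 0 + acc), acc))
          (row, (0 : Int))).1.length = row.length) ∧
      (((PySem.List.pyRange 0 (k : Int) 1).foldl
          (fun st j =>
            let acc := st.2 + PySem.List.pyGetD d j 0
            (PySem.List.pySetD st.1 j (PySem.List.pyGetD st.1 j 0 + acc), acc))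
          (row, (0 : Int))).2 = pvPsum d k) ∧
      ∀ j : Nat,
        ((PySem.List.pyRange 0 (k : Int) 1).foldl
          (fun st j =>
            let acc := st.2 + PySem.List.pyGetD d j 0
            (PySem.List.pySetD st.1 j (PySem.List.pyGetD st.1 j 0 + acc), acc))
          (row, (0 : Int))).1.getD j 0 =
        row.getD j 0 + (if j < k then pvPsum d (j + 1) else 0) := by
  intro k
  induction k with
  | zero =>
    intro _
    rw [PySem.List.pyRange_one_eq_nil (by omega)]
    refine ⟨rfl, by simp [pvPsum], ?_⟩
    intro j
    simp
  | succ k ih =>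
    intro hk
    obtain ⟨ihl, iha, ihc⟩ := ih (by omega)
    have hkc : ((k+1 : Nat) : Int) = (k : Int) + 1 := by push_cast; ring
    rw [hkc, PySem.List.pyRange_one_succ_right (by omega), List.foldl_append]
    set st := ((PySem.List.pyRange 0 (k : Int) 1).foldl
          (fun st j =>
            let acc := st.2 + PySem.List.pyGetD d j 0
            (PySem.List.pySetD st.1 j (PySem.List.pyGetD st.1 j 0 + acc), acc))
          (row, (0 : Int))) with hst
    simp only [List.foldl_cons, List.foldl_nil]
    have hget : PySem.List.pyGetD d (k : Int) 0 = d.getD k 0 := by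
      rw [PySem.List.pyGetD_natCast]
    have hget1 : PySem.List.pyGetD st.1 (k : Int) 0 = st.1.getD k 0 := by
      rw [PySem.List.pyGetD_natCast]
    have hset : ∀ v, PySem.List.pySetD st.1 (k : Int) v = st.1.set k v := by
      intro v; rw [PySem.List.pySetD_natCast]
    simp only [hget, hget1, hset, iha]
    refine ⟨by simp [ihl], by rw [pvPsum_succ], ?_⟩
    intro j
    rw [pvGetD_set]
    by_cases hj : j = k
    · subst hj
      rw [if_pos ⟨rfl, by omega⟩, ihc j, pvPsum_succ]
      split_ifs <;> omega
    · rw [if_neg (fun hc => hj hc.1), ihc j]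
      split_ifs <;> omega

def pvBodyP2 : List (List Int) → (Int × Option (List Int)) → List (List Int) := fun g xd =>
  match xd.2 with
  | none => g
  | some d =>
    let row := PySem.List.pyGetD g xd.1 []
    PySem.List.pySetD g xd.1
      ((PySem.List.pyRange 0 (row.length : Int) 1).foldl
        (fun st j =>
          let acc := st.2 + PySem.List.pyGetD d j 0
          (PySem.List.pySetD st.1 j (PySem.List.pyGetD st.1 j 0 + acc), acc))
        (row, (0 : Int))).1

def pvT (l : List (Int × Option (List Int))) (r j : Nat) : Int :=
  (l.map (fun p => match p.2 with
    | none => 0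
    | some d => if p.1 = (r : Int) then pvPsum d (j + 1) else 0)).sum

theorem pvStepP2 (grid g : List (List Int)) (xd : Int × Option (List Int))
    (hsh : pvShape g = pvShape grid)
    (hx : ∀ d, xd.2 = some d → 0 ≤ xd.1 ∧ xd.1 < (grid.length : Int)) :
    pvShape (pvBodyP2 g xd) = pvShape grid ∧
    ∀ r j : Nat, j < (grid.getD r []).length →
      pvCell (pvBodyP2 g xd) r j = pvCell g r j +
        (match xd.2 with | none => 0 | some d => if xd.1 = (r : Int) then pvPsum d (j + 1) else 0) := by
  obtain ⟨x, d?⟩ := xd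
  cases d? with
  | none => exact ⟨hsh, fun r j _ => by simp [pvBodyP2]⟩
  | some d =>
    obtain ⟨hx1, hx2⟩ := hx d rfl
    have hglen : g.length = grid.length := pvShape_length hsh
    have hx2' : x < (g.length : Int) := by rw [hglen]; exact hx2
    have hrow : PySem.List.pyGetD g x [] = g.getD x.toNat [] := by
      rw [pvGetD_nidx _ _ _ (by omega) hx2', pvNidx_toNat _ _ hx1]
    have hset : ∀ v, PySem.List.pySetD g x v = g.set x.toNat v := by
      intro v; rw [pvSetD_nidx _ _ _ (by omega) hx2', pvNidx_toNat _ _ hx1]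
    have hxlt : x.toNat < g.length := by omega
    unfold pvBodyP2
    dsimp only
    rw [hrow, hset]
    set row := g.getD x.toNat [] with hrowdef
    obtain ⟨hl, ha, hc⟩ := pvRowAux d row row.length le_rfl
    have hrl : row.length = (grid.getD x.toNat []).length := pvShape_row hsh x.toNat
    constructor
    · exact pvShape_set hsh x.toNat _ (by rw [hl])
    · intro r j hj
      unfold pvCell
      rw [pvGetD_set]
      by_cases hr : r = x.toNat
      · subst hr
        rw [if_pos ⟨rfl, hxlt⟩, hc j, if_pos (by rw [hrl]; exact hj)]
        rw [if_pos (by omega)]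
      · rw [if_neg (fun hcc => hr hcc.1), if_neg (by omega)]
        ring

theorem pvApplyAll (grid : List (List Int)) :
    ∀ (l : List (Int × Option (List Int))) (g : List (List Int)),
      (∀ p ∈ l, ∀ d, p.2 = some d → 0 ≤ p.1 ∧ p.1 < (grid.length : Int)) →
      pvShape g = pvShape grid →
      pvShape (l.foldl pvBodyP2 g) = pvShape grid ∧
      ∀ r j : Nat, j < (grid.getD r []).length →
        pvCell (l.foldl pvBodyP2 g) r j = pvCell g r j + pvT l r j := by
  intro l
  induction l with
  | nil =>
    intro g _ hsh
    exact ⟨hsh, fun r j _ => by simp [pvT]⟩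
  | cons p l ih =>
    intro g hcond hsh
    simp only [List.foldl_cons]
    obtain ⟨s1, c1⟩ := pvStepP2 grid g p hsh (hcond p (by simp))
    obtain ⟨s2, c2⟩ := ih (pvBodyP2 g p) (fun q hq => hcond q (by simp [hq])) s1
    refine ⟨s2, ?_⟩
    intro r j hj
    rw [c2 r j hj, c1 r j hj]
    simp only [pvT, List.map_cons, List.sum_cons]
    ring

def pvDS (ds : List (Option (List Int))) (r j : Nat) : Int :=
  match ds.getD r none with
  | none => 0
  | some d => pvPsum d (j + 1)

theorem pvT_enum :
    ∀ (ds : List (Option (List Int))) (s : Int) (r j : Nat),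
      pvT (PySem.List.enumerate ds s) r j =
        if s ≤ (r : Int) ∧ (r : Int) < s + ds.length then
          (match ds.getD ((r : Int) - s).toNat none with
           | none => 0
           | some d => pvPsum d (j + 1))
        else 0 := by
  intro ds
  induction ds with
  | nil =>
    intro s r j
    rw [if_neg (by simp)]
    simp [pvT, PySem.List.enumerate_nil]
  | cons hd tl ih =>
    intro s r j
    rw [PySem.List.enumerate_cons]
    simp only [pvT, List.map_cons, List.sum_cons]
    have ih' := ih (s+1) r j
    unfold pvT at ih'
    rw [ih']
    by_cases hrs : (r : Int) = s
    · rw [if_neg (by omega), if_pos (by simp; omega)]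
      have h0 : ((r : Int) - s).toNat = 0 := by omega
      rw [h0]
      cases hd <;> simp [hrs] <;> ring
    · by_cases hlt : s + 1 ≤ (r : Int) ∧ (r : Int) < s + 1 + tl.length
      · rw [if_pos hlt, if_pos (by simp; omega)]
        have h1 : ((r : Int) - s).toNat = ((r : Int) - (s+1)).toNat + 1 := by omega
        rw [h1]
        have hgd : (hd :: tl).getD (((r : Int) - (s+1)).toNat + 1) none =
            tl.getD ((r : Int) - (s+1)).toNat none := by
          simp [List.getD_eq_getElem?_getD]
        rw [hgd]
        cases hhd : hd <;> simp <;> intro hc <;> exact absurd hc.symm hrs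
      · rw [if_neg hlt, if_neg (by simp; omega)]
        cases hd <;> simp <;> intro hc <;> exact absurd hc.symm hrs

def pvBodyB (grid : List (List Int)) : List (Option (List Int)) → List (List Int) → List (Option (List Int)) := fun ds op =>
  let xa := PySem.List.pyGetD (PySem.List.pyGetD op 0 []) 0 0
  let xb := PySem.List.pyGetD (PySem.List.pyGetD op 1 []) 0 0
  let ya := PySem.List.pyGetD (PySem.List.pyGetD op 0 []) 1 0
  let yb := PySem.List.pyGetD (PySem.List.pyGetD op 1 []) 1 0
  if xa = xb then
    let lo := if ya ≤ yb then ya else yb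
    let hi := if ya ≤ yb then yb else ya
    let d0 := match PySem.List.pyGetD ds xa none with
      | none => List.replicate ((PySem.List.pyGetD grid xa []).length + 1) (0 : Int)
      | some d => d
    let d1 := PySem.List.pySetD d0 lo (PySem.List.pyGetD d0 lo 0 + 1)
    let d2 := PySem.List.pySetD d1 (hi + 1) (PySem.List.pyGetD d1 (hi + 1) 0 - 1)
    PySem.List.pySetD ds xa (some d2)
  else ds

theorem pvBump (n : Nat) (d0 : List Int) (hd0 : d0.length = n + 1) (lo hi : Int)
    (hlo0 : 0 ≤ lo) (hlohi : lo ≤ hi) (hhin : hi < (n : Int)) :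
    (PySem.List.pySetD (PySem.List.pySetD d0 lo (PySem.List.pyGetD d0 lo 0 + 1)) (hi + 1)
      (PySem.List.pyGetD (PySem.List.pySetD d0 lo (PySem.List.pyGetD d0 lo 0 + 1)) (hi + 1) 0 - 1)).length = d0.length ∧
    ∀ k : Nat,
      pvPsum (PySem.List.pySetD (PySem.List.pySetD d0 lo (PySem.List.pyGetD d0 lo 0 + 1)) (hi + 1)
        (PySem.List.pyGetD (PySem.List.pySetD d0 lo (PySem.List.pyGetD d0 lo 0 + 1)) (hi + 1) 0 - 1)) k =
      pvPsum d0 k + ((if lo < (k : Int) then 1 else 0) - (if hi + 1 < (k : Int) then 1 else 0)) := by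
  have hlo2 : lo < (d0.length : Int) := by omega
  have e1 : PySem.List.pySetD d0 lo (PySem.List.pyGetD d0 lo 0 + 1) =
      d0.set lo.toNat (d0.getD lo.toNat 0 + 1) := by
    rw [pvSetD_nidx _ _ _ (by omega) hlo2, pvGetD_nidx _ _ _ (by omega) hlo2,
      pvNidx_toNat _ _ hlo0]
  rw [e1]
  set d1 := d0.set lo.toNat (d0.getD lo.toNat 0 + 1) with hd1
  have hd1len : d1.length = d0.length := by rw [hd1, List.length_set]
  have hhi2 : hi + 1 < (d1.length : Int) := by omega
  have e2 : PySem.List.pySetD d1 (hi + 1) (PySem.List.pyGetD d1 (hi + 1) 0 - 1) =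
      d1.set (hi + 1).toNat (d1.getD (hi + 1).toNat 0 + (-1)) := by
    rw [pvSetD_nidx _ _ _ (by omega) hhi2, pvGetD_nidx _ _ _ (by omega) hhi2,
      pvNidx_toNat _ _ (by omega), sub_eq_add_neg]
  rw [e2]
  constructor
  · rw [List.length_set, hd1len]
  · intro k
    rw [pvPsum_set _ _ _ _ (by omega), hd1, pvPsum_set _ _ _ _ (by omega)]
    split_ifs <;> omega

theorem pvStepB (grid : List (List Int)) (op : List (List Int)) (ds : List (Option (List Int)))
    (hgood : pvGood grid op) (hlen : ds.length = grid.length)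
    (hwf : ∀ r d, ds.getD r none = some d → d.length = (grid.getD r []).length + 1) :
    (pvBodyB grid ds op).length = grid.length ∧
    (∀ r d, (pvBodyB grid ds op).getD r none = some d → d.length = (grid.getD r []).length + 1) ∧
    ∀ r j : Nat, r < grid.length → j < (grid.getD r []).length →
      pvDS (pvBodyB grid ds op) r j = pvDS ds r j + pvCnt grid op r j := by
  have h0 : PySem.List.pyGetD (PySem.List.pyGetD op 0 []) 0 0 = pvA0 op := by
    rw [pvGetD_zero', pvGetD_zero']; rfl
  have h1 : PySem.List.pyGetD (PySem.List.pyGetD op 1 []) 0 0 = pvB0 op := by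
    rw [pvGetD_one, pvGetD_zero']; rfl
  have h2 : PySem.List.pyGetD (PySem.List.pyGetD op 0 []) 1 0 = pvA1 op := by
    rw [pvGetD_zero', pvGetD_one]; rfl
  have h3 : PySem.List.pyGetD (PySem.List.pyGetD op 1 []) 1 0 = pvB1 op := by
    rw [pvGetD_one, pvGetD_one]; rfl
  unfold pvBodyB
  dsimp only
  rw [h0, h1, h2, h3]
  by_cases hv : pvA0 op = pvB0 op
  · rw [if_pos hv]
    obtain ⟨b1, b2, b3, b4⟩ := hgood hv
    set r0 := pvNidx grid.length (pvA0 op) with hr0def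
    have hr0lt : r0 < grid.length := pvNidx_lt _ _ b1 b2
    have hloe : (if pvA1 op ≤ pvB1 op then pvA1 op else pvB1 op) = pvLo op := by
      unfold pvLo; split_ifs <;> omega
    have hhie : (if pvA1 op ≤ pvB1 op then pvB1 op else pvA1 op) = pvHi op := by
      unfold pvHi; split_ifs <;> omega
    rw [hloe, hhie]
    have hb1' : -(ds.length : Int) ≤ pvA0 op := by rw [hlen]; exact b1
    have hb2' : pvA0 op < (ds.length : Int) := by rw [hlen]; exact b2
    have hdsg : PySem.List.pyGetD ds (pvA0 op) none = ds.getD r0 none := by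
      rw [pvGetD_nidx _ _ _ hb1' hb2', hlen]
    have hgg : PySem.List.pyGetD grid (pvA0 op) [] = grid.getD r0 [] := by
      rw [pvGetD_nidx _ _ _ b1 b2]
    have hsetds : ∀ v, PySem.List.pySetD ds (pvA0 op) v = ds.set r0 v := by
      intro v; rw [pvSetD_nidx _ _ _ hb1' hb2', hlen]
    rw [hdsg, hgg, hsetds]
    set n := (grid.getD r0 []).length with hn
    have hlohi : pvLo op ≤ pvHi op := by unfold pvLo pvHi; omega
    -- the difference array in play, by cases on whether the row was touched before
    cases hcase : ds.getD r0 none with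
    | none =>
      dsimp only
      obtain ⟨blen, bsum⟩ := pvBump n (List.replicate (n + 1) (0 : Int)) (by simp)
        (pvLo op) (pvHi op) b3 hlohi b4
      refine ⟨by rw [List.length_set, hlen], ?_, ?_⟩
      · intro r d hget
        rw [pvGetD_set] at hget
        split_ifs at hget with hcc
        · cases hget
          rw [blen, List.length_replicate, hcc.1, ← hn]
        · exact hwf r d hget
      · intro r j hr hj
        unfold pvDS
        rw [pvGetD_set]
        by_cases hr' : r = r0
        · subst hr'
          rw [if_pos ⟨rfl, by omega⟩, hcase]
          dsimp only
          rw [bsum, pvPsum_replicate]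
          unfold pvCnt
          rw [← hr0def]
          split_ifs <;> omega
        · rw [if_neg (fun hcc => hr' hcc.1)]
          unfold pvCnt
          rw [← hr0def, if_neg (fun hcc => hr' hcc.2.1.symm)]
          ring
    | some d =>
      dsimp only
      have hdlen : d.length = n + 1 := hwf r0 d hcase
      obtain ⟨blen, bsum⟩ := pvBump n d hdlen (pvLo op) (pvHi op) b3 hlohi b4
      refine ⟨by rw [List.length_set, hlen], ?_, ?_⟩
      · intro r d' hget
        rw [pvGetD_set] at hget
        split_ifs at hget with hcc
        · cases hget
          rw [blen, hdlen, hcc.1, ← hn]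
        · exact hwf r d' hget
      · intro r j hr hj
        unfold pvDS
        rw [pvGetD_set]
        by_cases hr' : r = r0
        · subst hr'
          rw [if_pos ⟨rfl, by omega⟩, hcase]
          dsimp only
          rw [bsum]
          unfold pvCnt
          rw [← hr0def]
          split_ifs <;> omega
        · rw [if_neg (fun hcc => hr' hcc.1)]
          unfold pvCnt
          rw [← hr0def, if_neg (fun hcc => hr' hcc.2.1.symm)]
          ring
  · rw [if_neg hv]
    refine ⟨hlen, hwf, ?_⟩
    intro r j _ _
    unfold pvCnt
    rw [if_neg (fun hcc => hv hcc.1)]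
    ring

theorem pvGetD_replicate_none (L r : Nat) :
    (List.replicate L (none : Option (List Int))).getD r none = none := by
  simp [List.getD_eq_getElem?_getD, List.getElem?_replicate]
  split_ifs <;> rfl

theorem pvBuild (grid : List (List Int)) :
    ∀ (ops : List (List (List Int))) (ds : List (Option (List Int))),
      (∀ op ∈ ops, pvGood grid op) → ds.length = grid.length →
      (∀ r d, ds.getD r none = some d → d.length = (grid.getD r []).length + 1) →
      (ops.foldl (pvBodyB grid) ds).length = grid.length ∧
      (∀ r d, (ops.foldl (pvBodyB grid) ds).getD r none = some d →
        d.length = (grid.getD r []).length + 1) ∧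
      ∀ r j : Nat, r < grid.length → j < (grid.getD r []).length →
        pvDS (ops.foldl (pvBodyB grid) ds) r j = pvDS ds r j + pvS grid ops r j := by
  intro ops
  induction ops with
  | nil =>
    intro ds _ hlen hwf
    exact ⟨hlen, hwf, fun r j _ _ => by simp [pvS]⟩
  | cons op ops ih =>
    intro ds hgood hlen hwf
    simp only [List.foldl_cons]
    obtain ⟨l1, w1, c1⟩ := pvStepB grid op ds (hgood op (by simp)) hlen hwf
    obtain ⟨l2, w2, c2⟩ := ih (pvBodyB grid ds op) (fun o ho => hgood o (by simp [ho])) l1 w1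
    refine ⟨l2, w2, ?_⟩
    intro r j hr hj
    rw [c2 r j hr hj, c1 r j hr hj]
    simp only [pvS, List.map_cons, List.sum_cons]
    ring

theorem pvAlt_main (grid : List (List Int)) (ops : List (List (List Int)))
    (hgood : ∀ op ∈ ops, pvGood grid op) :
    pvShape ((PySem.List.enumerate (ops.foldl (pvBodyB grid)
        (List.replicate grid.length (none : Option (List Int)))) 0).foldl pvBodyP2 grid) = pvShape grid ∧
    ∀ r j : Nat, r < grid.length → j < (grid.getD r []).length →
      pvCell ((PySem.List.enumerate (ops.foldl (pvBodyB grid)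
        (List.replicate grid.length (none : Option (List Int)))) 0).foldl pvBodyP2 grid) r j =
      pvCell grid r j + pvS grid ops r j := by
  obtain ⟨hlenF, _, hdsF⟩ := pvBuild grid ops (List.replicate grid.length none) hgood
    (by simp) (fun r d h => by rw [pvGetD_replicate_none] at h; cases h)
  set dsF := ops.foldl (pvBodyB grid) (List.replicate grid.length (none : Option (List Int))) with hdsFdef
  have hcond : ∀ p ∈ PySem.List.enumerate dsF 0, ∀ d, p.2 = some d →
      0 ≤ p.1 ∧ p.1 < (grid.length : Int) := by
    intro p hp d _
    rw [PySem.List.mem_enumerate_iff] at hp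
    obtain ⟨k, hk, rfl⟩ := hp
    constructor
    · simp
    · simp only [zero_add]
      rw [← hlenF]
      exact_mod_cast hk
  obtain ⟨sB, cB⟩ := pvApplyAll grid (PySem.List.enumerate dsF 0) grid hcond rfl
  refine ⟨sB, ?_⟩
  intro r j hr hj
  rw [cB r j hj, pvT_enum dsF 0 r j]
  rw [if_pos (by constructor <;> [omega; (rw [hlenF]; push_cast; omega)])]
  have hto : ((r : Int) - 0).toNat = r := by omega
  rw [hto]
  have := hdsF r j hr hj
  unfold pvDS at this
  rw [this]
  rw [pvGetD_replicate_none]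
  ring

theorem pvEq (grid g1 g2 : List (List Int))
    (h1 : pvShape g1 = pvShape grid) (h2 : pvShape g2 = pvShape grid)
    (hc : ∀ r j : Nat, r < grid.length → j < (grid.getD r []).length →
      pvCell g1 r j = pvCell g2 r j) : g1 = g2 := by
  have hl1 := pvShape_length h1
  have hl2 := pvShape_length h2
  apply List.ext_getElem (by omega)
  intro r hr1 hr2
  have hrg : r < grid.length := by omega
  have e1 : g1[r] = g1.getD r [] := (List.getD_eq_getElem g1 [] hr1).symm
  have e2 : g2[r] = g2.getD r [] := (List.getD_eq_getElem g2 [] hr2).symm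
  have hrow1 := pvShape_row h1 r
  have hrow2 := pvShape_row h2 r
  apply List.ext_getElem (by rw [e1, e2]; omega)
  intro j hj1 hj2
  have hjg : j < (grid.getD r []).length := by
    rw [e1] at hj1; omega
  have := hc r j hrg hjg
  unfold pvCell at this
  rw [List.getD_eq_getElem _ _ (by omega : j < (g1.getD r []).length)] at this
  rw [List.getD_eq_getElem _ _ (by omega : j < (g2.getD r []).length)] at this
  simp only [e1, e2]
  exact this

theorem pvGood_of (grid : List (List Int)) (ops : List (List (List Int)))
    (hpre : Pre_draw_horizontal_lines grid ops) :
    ∀ op ∈ ops, pvGood grid op := by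
  intro op hop hv
  obtain ⟨hs1, hs2, hs3, hbound⟩ := hpre op hop
  have hv' : (op.getD 0 []).getD 0 0 = (op.getD 1 []).getD 0 0 := hv
  obtain ⟨c1, c2, c3, c4⟩ := hbound hv'
  exact ⟨c1, c2, c3, c4⟩

-- ===== VERDICT (by name: the statement is the Claim_ definition above) =====
theorem draw_horizontal_lines_spec : Claim_equal_draw_horizontal_lines := by
  intro grid ops _ hpre
  show draw_horizontal_lines grid ops = draw_horizontal_lines_alt grid ops
  have hgood := pvGood_of grid ops hpre
  obtain ⟨sA, cA⟩ := pvA_main grid ops grid hgood rfl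
  obtain ⟨sB, cB⟩ := pvAlt_main grid ops hgood
  have eA : draw_horizontal_lines grid ops = ops.foldl pvBodyA grid := rfl
  have eB : draw_horizontal_lines_alt grid ops =
      (PySem.List.enumerate (ops.foldl (pvBodyB grid)
        (List.replicate grid.length (none : Option (List Int)))) 0).foldl pvBodyP2 grid := rfl
  rw [eA, eB]
  exact pvEq grid _ _ sA sB (fun r j hr hj => by rw [cA r j, cB r j hr hj])
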